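-- pv_equiv track=rewrite | github.com/BlueBrain/nexus-forge | kgforge/core/archetypes/resolver.py | escape_punctuation
-- ===== SOURCE A (Python) =====
-- def escape_punctuation(text):
--     if not isinstance(text, str):
--         raise TypeError('Only accepting strings.')
--     punctuation = "-()\"#/@;:<>{}`+=~|.!?,"
--     for p in punctuation:
--         if p in text:
--             text = text.replace(p, f"\\\\{p}")
--     return text
-- ===== SOURCE B (Python) =====
-- def escape_punctuation(text):
--     if not isinstance(text, str):
--         raise TypeError('Only accepting strings.')
--     punct = set("-()\"#/@;:<>{}`+=~|.!?,")
--     return ''.join('\\\\' + c if c in punct else c for c in text)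
-- ===== Notes on version B (the rewrite author's own statement) =====
-- stated objective: idiomatic
-- what changed: A loops over the 22 punctuation characters applying str.replace to the whole text each time; B makes a single left-to-right pass over the input, prefixing each punctuation character with two backslashes and joining the pieces.
import Mathlib
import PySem

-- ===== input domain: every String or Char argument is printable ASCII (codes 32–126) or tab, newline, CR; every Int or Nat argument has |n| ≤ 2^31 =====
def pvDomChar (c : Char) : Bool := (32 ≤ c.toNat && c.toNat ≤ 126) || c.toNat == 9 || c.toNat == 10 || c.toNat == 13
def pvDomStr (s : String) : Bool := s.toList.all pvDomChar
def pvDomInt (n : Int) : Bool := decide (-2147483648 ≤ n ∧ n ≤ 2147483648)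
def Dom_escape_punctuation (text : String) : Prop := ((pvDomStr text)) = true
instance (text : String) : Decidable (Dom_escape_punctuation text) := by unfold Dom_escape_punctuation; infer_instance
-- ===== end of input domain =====

-- B replaces A's loop over the 22 punctuation characters with repeated str.replace by a
-- single left-to-right scan of the input that emits two backslashes before each punctuation character (objective: idiomatic).
-- A's isinstance/TypeError guard is type-level in Lean (text : String), so both ports are total.

-- ===== PORT A =====
-- for p in punctuation: if p in text: text = text.replace(p, "\\\\" + p)
def escape_punctuation (text : String) : String :=
  let punctuation : String := "-()\"#/@;:<>{}`+=~|.!?,"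
  punctuation.toList.foldl
    (fun t p =>
      if PySem.Str.isIn (String.ofList [p]) t then
        PySem.Str.replace t (String.ofList [p]) (String.ofList ['\\', '\\', p])
      else t)
    text

-- ===== PORT B =====
-- punct = set(...); ''.join('\\\\' + c if c in punct else c for c in text)
def pvPunctSet : PySem.Set Char := PySem.Set.ofList "-()\"#/@;:<>{}`+=~|.!?,".toList

def escape_punctuation_alt (text : String) : String :=
  String.ofList
    (text.toList.flatMap (fun c =>
      if PySem.Set.contains pvPunctSet c then ['\\', '\\', c] else [c]))

-- ===== PRECONDITION & SPEC =====
def Spec_escape_punctuation (text : String) (out : String) : Prop := out = escape_punctuation_alt text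
instance (text : String) (out : String) : Decidable (Spec_escape_punctuation text out) := by unfold Spec_escape_punctuation; infer_instance

-- ===== CLAIM (what is proved, stated in full; the proofs are below) =====
def Claim_equal_escape_punctuation : Prop := ∀ (text : String), Dom_escape_punctuation text → Spec_escape_punctuation text (escape_punctuation text)

-- ===== LEMMAS AND PROOFS =====
set_option maxHeartbeats 1000000

-- single-character replace is a per-character flatMap
theorem pv_go_flatMap (p : Char) (new : List Char) :
    ∀ (fuel : Nat) (l acc : List Char), l.length ≤ fuel →
      PySem.Chars.replace.go [p] new fuel l acc
        = acc.reverse ++ l.flatMap (fun c => if c = p then new else [c]) := by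
  intro fuel
  induction fuel with
  | zero =>
    intro l acc h
    cases l with
    | nil => simp [PySem.Chars.replace.go]
    | cons c t => simp at h
  | succ n ih =>
    intro l acc h
    cases l with
    | nil => simp [PySem.Chars.replace.go]
    | cons c t =>
      simp only [PySem.Chars.replace.go]
      by_cases hc : c = p
      · subst hc
        simp only [List.isPrefixOf, BEq.rfl, Bool.true_and, if_pos]
        rw [ih]
        · simp
        · simpa using Nat.le_of_succ_le_succ h
      · have : [p].isPrefixOf (c :: t) = false := by
          simp [List.isPrefixOf]; exact fun h' => (hc h'.symm).elim
        rw [this]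
        simp only [Bool.false_eq_true]
        rw [ih t (c :: acc) (by simpa using Nat.le_of_succ_le_succ h)]
        simp [hc]

theorem pv_replace_single (p : Char) (new X : List Char) :
    PySem.Chars.replace X [p] new = X.flatMap (fun c => if c = p then new else [c]) := by
  rw [PySem.Chars.replace]
  simp only [List.isEmpty_cons, Bool.false_eq_true]
  exact pv_go_flatMap p new X.length X [] le_rfl

-- A's guarded replace step, with or without the 'p in text' guard, is the flatMap step
theorem pv_step_flatMap (p : Char) (X : List Char) :
    (if PySem.Chars.isIn [p] X then PySem.Chars.replace X [p] ['\\', '\\', p] else X)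
      = X.flatMap (fun c => if c = p then ['\\', '\\', p] else [c]) := by
  by_cases h : PySem.Chars.isIn [p] X = true
  · rw [if_pos h, pv_replace_single]
  · rw [if_neg h]
    have hp : p ∉ X := by
      intro hmem
      exact h ((PySem.Chars.isIn_iff_infix [p] X).mpr ((List.singleton_infix_iff p X).mpr hmem))
    conv_lhs => rw [← List.flatMap_singleton' X]
    refine List.flatMap_congr (fun c hc => ?_)
    have hne : ¬ c = p := fun he => hp (he ▸ hc)
    rw [if_neg hne]

-- the escaping map for a set `done` of already-processed characters
def pvEsc (done : List Char) (c : Char) : List Char :=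
  if c ∈ done then ['\\', '\\', c] else [c]

-- loop invariant: folding A's step over `rest` extends the processed set by `rest`
theorem pv_foldl_inv (rest : List Char) :
    ∀ (done s : List Char), rest.Nodup → '\\' ∉ rest → (∀ c ∈ rest, c ∉ done) →
      rest.foldl
        (fun t p => if PySem.Chars.isIn [p] t then PySem.Chars.replace t [p] ['\\', '\\', p] else t)
        (s.flatMap (pvEsc done))
      = s.flatMap (pvEsc (done ++ rest)) := by
  induction rest with
  | nil => intro done s _ _ _; simp
  | cons p rest ih =>
    intro done s hnd hbs hdisj
    have hpbs : p ≠ '\\' := fun h => hbs (h ▸ List.mem_cons_self)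
    have hpd : p ∉ done := hdisj p List.mem_cons_self
    simp only [List.foldl_cons]
    rw [pv_step_flatMap, List.flatMap_assoc]
    have hstep : (fun c => (pvEsc done c).flatMap (fun c' => if c' = p then ['\\', '\\', p] else [c']))
        = pvEsc (done ++ [p]) := by
      funext c
      by_cases hc : c ∈ done
      · have hcp : c ≠ p := fun h => hpd (h ▸ hc)
        simp [pvEsc, hc, hcp, Ne.symm hpbs]
      · by_cases hcp : c = p
        · subst hcp; simp [pvEsc, hc]
        · simp [pvEsc, hc, hcp]
    rw [hstep, ih (done ++ [p]) s (List.Nodup.of_cons hnd)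
        (fun h => hbs (List.mem_cons_of_mem _ h))
        (fun c hc => by
          simp only [List.mem_append, List.mem_singleton]
          rintro (h | h)
          · exact hdisj c (List.mem_cons_of_mem _ hc) h
          · exact (List.nodup_cons.mp hnd).1 (h ▸ hc))]
    simp

-- the string-level fold of A equals the character-level fold
theorem pv_key (l : List Char) : ∀ (t : String),
    l.foldl (fun t p =>
        if PySem.Str.isIn (String.ofList [p]) t then
          PySem.Str.replace t (String.ofList [p]) (String.ofList ['\\', '\\', p])
        else t) t
    = String.ofList (l.foldl
        (fun t p => if PySem.Chars.isIn [p] t then PySem.Chars.replace t [p] ['\\', '\\', p] else t)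
        t.toList) := by
  induction l with
  | nil => intro t; simp
  | cons p l ih =>
    intro t
    have hstep : (if PySem.Str.isIn (String.ofList [p]) t then
          PySem.Str.replace t (String.ofList [p]) (String.ofList ['\\', '\\', p]) else t).toList
        = if PySem.Chars.isIn [p] t.toList then PySem.Chars.replace t.toList [p] ['\\', '\\', p] else t.toList := by
      by_cases h : PySem.Chars.isIn [p] t.toList = true
      · rw [if_pos h, if_pos (by simpa [PySem.Str.isIn_eq] using h)]
        simp [PySem.Str.toList_replace]
      · rw [if_neg h, if_neg (by simpa [PySem.Str.isIn_eq] using h)]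
    rw [List.foldl_cons, List.foldl_cons, ih, hstep]

theorem pv_A_eq (text : String) :
    escape_punctuation text
    = String.ofList (("-()\"#/@;:<>{}`+=~|.!?,".toList).foldl
        (fun t p => if PySem.Chars.isIn [p] t then PySem.Chars.replace t [p] ['\\', '\\', p] else t)
        text.toList) := pv_key _ text

def pvPunctList : List Char := ['-','(',')','"','#','/','@',';',':','<','>','{','}','`','+','=','~','|','.','!','?',',']
theorem pv_punct_toList : "-()\"#/@;:<>{}`+=~|.!?,".toList = pvPunctList := by decide
theorem pv_punct_nodup : pvPunctList.Nodup := by decide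
theorem pv_punct_nobs : '\\' ∉ pvPunctList := by decide
theorem pv_punctSet_eq : pvPunctSet = pvPunctList := by decide

-- ===== VERDICT (by name: the statement is the Claim_ definition above) =====
set_option maxRecDepth 8192 in
theorem escape_punctuation_spec : Claim_equal_escape_punctuation := by
  intro text _
  show escape_punctuation text = escape_punctuation_alt text
  rw [pv_A_eq, pv_punct_toList]
  unfold escape_punctuation_alt
  rw [pv_punctSet_eq]
  have hfold :
      pvPunctList.foldl
        (fun t p => if PySem.Chars.isIn [p] t then PySem.Chars.replace t [p] ['\\', '\\', p] else t)
        text.toList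
      = text.toList.flatMap (pvEsc ([] ++ pvPunctList)) := by
    have h0 : text.toList = text.toList.flatMap (pvEsc []) := by
      have hid : pvEsc [] = fun c : Char => [c] := by funext c; simp [pvEsc]
      rw [hid, List.flatMap_singleton']
    conv_lhs => rw [h0]
    exact pv_foldl_inv pvPunctList [] text.toList pv_punct_nodup pv_punct_nobs (by simp)
  rw [hfold]
  refine congrArg String.ofList (List.flatMap_congr fun c hc => ?_)
  simp only [List.nil_append]
  unfold pvEsc
  by_cases hmem : c ∈ pvPunctList
  · rw [if_pos hmem, if_pos ((PySem.Set.contains_iff _ _).mpr hmem)]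
  · rw [if_neg hmem, if_neg (fun h => hmem ((PySem.Set.contains_iff _ _).mp h))]
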